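-- pv_equiv track=rewrite | github.com/kroue/licensure | backend/main.py | canonicalize_header
-- ===== SOURCE A (Python) =====
-- REQUIRED_COLUMNS = [
--     "Student_Code",
--     "Student_Name",
--     "Email",
--     "GWA",
--     "MSTE_AVE",
--     "HPGE_AVE",
--     "PSAD_AVE",
--     "COMPREHENSION_INDEX",
--     "Graduated_with_Latin",
--     "Age",
--     "Gender",
--     "Father_Monthly_Income",
--     "Father_Educational_Attainment",
--     "Mother_Monthly_Income",
--     "Mother_Educational_Attainment",
--     "Year_Level",
--     "Exam_year",
--     "Months_prep",
-- ]
--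
-- COLUMN_ALIASES: dict[str, list[str]] = {
--     "Student_Code": ["STUDENT_CODE", "STUDENTID", "STUDENT_ID", "STUDENTNO"],
--     "Student_Name": ["STUDENT_NAME", "NAME", "FULL_NAME", "STUDENT"],
--     "Email": ["EMAIL", "E_MAIL", "STUDENT_EMAIL", "EMAIL_ADDRESS"],
--     "GWA": ["GWA", "GENERAL_WEIGHTED_AVERAGE"],
--     "MSTE_AVE": ["MSTE_AVE", "MSTE"],
--     "HPGE_AVE": ["HPGE_AVE", "HPGE"],
--     "PSAD_AVE": ["PSAD_AVE", "PSAD_AVG", "PSAD"],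
--     "COMPREHENSION_INDEX": ["COMPREHENSION_INDEX", "COMPREHENSION", "ENGLISH_SUBJECTS"],
--     "Graduated_with_Latin": ["GRADUATED_WITH_LATIN", "LATIN_HONORS", "WITH_LATIN_HONORS"],
--     "Age": ["AGE"],
--     "Gender": ["GENDER", "SEX"],
--     "Father_Monthly_Income": ["FATHER_MONTHLY_INCOME", "FATHER_INCOME"],
--     "Father_Educational_Attainment": ["FATHER_EDUCATIONAL_ATTAINMENT", "FATHER_EDUCATION"],
--     "Mother_Monthly_Income": ["MOTHER_MONTHLY_INCOME", "MOTHER_INCOME"],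
--     "Mother_Educational_Attainment": ["MOTHER_EDUCATIONAL_ATTAINMENT", "MOTHER_EDUCATION"],
--     "Year_Level": ["YEAR_LEVEL", "YEARLEVEL", "YEAR"],
--     "Exam_year": ["EXAM_YEAR", "EXAMYEAR"],
--     "Months_prep": ["MONTHS_PREP", "MONTHS_PREPARATION", "MONTHS_OF_PREP"],
-- }
--
-- def normalize_header(value: str) -> str:
--     text = str(value).strip()
--     text = "".join(ch if ch.isalnum() else "_" for ch in text)
--     text = text.strip("_")
--     return text.upper()
--
-- def canonicalize_header(header: str) -> str:
--     normalized = normalize_header(header)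
--     for required in REQUIRED_COLUMNS:
--         if normalize_header(required) == normalized:
--             return required
--         if normalized in COLUMN_ALIASES.get(required, []):
--             return required
--     return header.strip()
-- ===== SOURCE B (Python) =====
-- # Flat literal lookup table (normalized header -> canonical column), first-match
-- # precedence of REQUIRED_COLUMNS already baked in; single dict probe per call.
-- _CANON = {
--     "STUDENT_CODE": "Student_Code",
--     "STUDENTID": "Student_Code",
--     "STUDENT_ID": "Student_Code",
--     "STUDENTNO": "Student_Code",
--     "STUDENT_NAME": "Student_Name",
--     "NAME": "Student_Name",
--     "FULL_NAME": "Student_Name",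
--     "STUDENT": "Student_Name",
--     "EMAIL": "Email",
--     "E_MAIL": "Email",
--     "STUDENT_EMAIL": "Email",
--     "EMAIL_ADDRESS": "Email",
--     "GWA": "GWA",
--     "GENERAL_WEIGHTED_AVERAGE": "GWA",
--     "MSTE_AVE": "MSTE_AVE",
--     "MSTE": "MSTE_AVE",
--     "HPGE_AVE": "HPGE_AVE",
--     "HPGE": "HPGE_AVE",
--     "PSAD_AVE": "PSAD_AVE",
--     "PSAD_AVG": "PSAD_AVE",
--     "PSAD": "PSAD_AVE",
--     "COMPREHENSION_INDEX": "COMPREHENSION_INDEX",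
--     "COMPREHENSION": "COMPREHENSION_INDEX",
--     "ENGLISH_SUBJECTS": "COMPREHENSION_INDEX",
--     "GRADUATED_WITH_LATIN": "Graduated_with_Latin",
--     "LATIN_HONORS": "Graduated_with_Latin",
--     "WITH_LATIN_HONORS": "Graduated_with_Latin",
--     "AGE": "Age",
--     "GENDER": "Gender",
--     "SEX": "Gender",
--     "FATHER_MONTHLY_INCOME": "Father_Monthly_Income",
--     "FATHER_INCOME": "Father_Monthly_Income",
--     "FATHER_EDUCATIONAL_ATTAINMENT": "Father_Educational_Attainment",
--     "FATHER_EDUCATION": "Father_Educational_Attainment",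
--     "MOTHER_MONTHLY_INCOME": "Mother_Monthly_Income",
--     "MOTHER_INCOME": "Mother_Monthly_Income",
--     "MOTHER_EDUCATIONAL_ATTAINMENT": "Mother_Educational_Attainment",
--     "MOTHER_EDUCATION": "Mother_Educational_Attainment",
--     "YEAR_LEVEL": "Year_Level",
--     "YEARLEVEL": "Year_Level",
--     "YEAR": "Year_Level",
--     "EXAM_YEAR": "Exam_year",
--     "EXAMYEAR": "Exam_year",
--     "MONTHS_PREP": "Months_prep",
--     "MONTHS_PREPARATION": "Months_prep",
--     "MONTHS_OF_PREP": "Months_prep",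
-- }
--
-- def _norm(value: str) -> str:
--     # one pass: uppercase alphanumerics, '_' for everything else
--     chars = []
--     for ch in str(value).strip():
--         chars.append(ch.upper() if ch.isalnum() else "_")
--     return "".join(chars).strip("_")
--
-- def canonicalize_header(header: str) -> str:
--     return _CANON.get(_norm(header), header.strip())
-- ===== Notes on version B (the rewrite author's own statement) =====
-- stated objective: idiomatic
-- what changed: Replaces A's per-call scan of REQUIRED_COLUMNS (re-normalizing every required name and probing its alias list) with a single flat literal dict from normalized header to canonical column (first-match precedence baked in) probed once per call, plus a one-pass normalizer that uppercases character by character instead of A's join-then-strip-then-upper pipeline; same header.strip() fallback.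
import Mathlib
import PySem

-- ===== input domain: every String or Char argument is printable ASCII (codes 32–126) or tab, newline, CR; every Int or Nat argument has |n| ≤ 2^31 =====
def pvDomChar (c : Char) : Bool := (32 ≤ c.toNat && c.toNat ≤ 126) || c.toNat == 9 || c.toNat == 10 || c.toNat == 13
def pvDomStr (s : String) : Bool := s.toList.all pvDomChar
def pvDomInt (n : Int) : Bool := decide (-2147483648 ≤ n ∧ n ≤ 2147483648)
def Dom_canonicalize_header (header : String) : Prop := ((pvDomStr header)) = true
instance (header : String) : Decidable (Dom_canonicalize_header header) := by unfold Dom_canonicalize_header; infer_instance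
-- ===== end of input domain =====

-- B replaces A's per-call scan of REQUIRED_COLUMNS (re-normalizing every required name and probing
-- its alias list) with one flat literal normalized-key → canonical-name dict probed once per call,
-- and a one-pass per-character normalizer; same header.strip() fallback (total equivalence proved).

-- ===== PORT A =====
def REQUIRED_COLUMNS : List String := [
  "Student_Code", "Student_Name", "Email", "GWA", "MSTE_AVE", "HPGE_AVE", "PSAD_AVE",
  "COMPREHENSION_INDEX", "Graduated_with_Latin", "Age", "Gender", "Father_Monthly_Income",
  "Father_Educational_Attainment", "Mother_Monthly_Income", "Mother_Educational_Attainment",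
  "Year_Level", "Exam_year", "Months_prep"]

def COLUMN_ALIASES : PySem.Dict String (List String) := PySem.Dict.ofList [
  ("Student_Code", ["STUDENT_CODE", "STUDENTID", "STUDENT_ID", "STUDENTNO"]),
  ("Student_Name", ["STUDENT_NAME", "NAME", "FULL_NAME", "STUDENT"]),
  ("Email", ["EMAIL", "E_MAIL", "STUDENT_EMAIL", "EMAIL_ADDRESS"]),
  ("GWA", ["GWA", "GENERAL_WEIGHTED_AVERAGE"]),
  ("MSTE_AVE", ["MSTE_AVE", "MSTE"]),
  ("HPGE_AVE", ["HPGE_AVE", "HPGE"]),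
  ("PSAD_AVE", ["PSAD_AVE", "PSAD_AVG", "PSAD"]),
  ("COMPREHENSION_INDEX", ["COMPREHENSION_INDEX", "COMPREHENSION", "ENGLISH_SUBJECTS"]),
  ("Graduated_with_Latin", ["GRADUATED_WITH_LATIN", "LATIN_HONORS", "WITH_LATIN_HONORS"]),
  ("Age", ["AGE"]),
  ("Gender", ["GENDER", "SEX"]),
  ("Father_Monthly_Income", ["FATHER_MONTHLY_INCOME", "FATHER_INCOME"]),
  ("Father_Educational_Attainment", ["FATHER_EDUCATIONAL_ATTAINMENT", "FATHER_EDUCATION"]),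
  ("Mother_Monthly_Income", ["MOTHER_MONTHLY_INCOME", "MOTHER_INCOME"]),
  ("Mother_Educational_Attainment", ["MOTHER_EDUCATIONAL_ATTAINMENT", "MOTHER_EDUCATION"]),
  ("Year_Level", ["YEAR_LEVEL", "YEARLEVEL", "YEAR"]),
  ("Exam_year", ["EXAM_YEAR", "EXAMYEAR"]),
  ("Months_prep", ["MONTHS_PREP", "MONTHS_PREPARATION", "MONTHS_OF_PREP"])]

def normalize_header (value : String) : String :=
  let text := PySem.Str.strip value
  -- "".join(ch if ch.isalnum() else "_" for ch in text)  — exact on the ASCII domain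
  let text := String.ofList (text.toList.map (fun ch => if PySem.Chars.isalnum ch then ch else '_'))
  let text := PySem.Str.stripChars text "_"
  PySem.Str.upper text

-- the 'for required in REQUIRED_COLUMNS' loop of A (early return ⇒ structural recursion)
def canonLoopA (header normalized : String) : List String → String
  | [] => PySem.Str.strip header
  | required :: rest =>
    if normalize_header required == normalized then required
    else if (PySem.Dict.getD COLUMN_ALIASES required []).contains normalized then required
    else canonLoopA header normalized rest

def canonicalize_header (header : String) : String :=
  canonLoopA header (normalize_header header) REQUIRED_COLUMNS

-- ===== PORT B =====
-- Source B's _CANON: flat literal dict, normalized header → canonical column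
def CANON : PySem.Dict String String := PySem.Dict.ofList [
  ("STUDENT_CODE", "Student_Code"), ("STUDENTID", "Student_Code"),
  ("STUDENT_ID", "Student_Code"), ("STUDENTNO", "Student_Code"),
  ("STUDENT_NAME", "Student_Name"), ("NAME", "Student_Name"),
  ("FULL_NAME", "Student_Name"), ("STUDENT", "Student_Name"),
  ("EMAIL", "Email"), ("E_MAIL", "Email"),
  ("STUDENT_EMAIL", "Email"), ("EMAIL_ADDRESS", "Email"),
  ("GWA", "GWA"), ("GENERAL_WEIGHTED_AVERAGE", "GWA"),
  ("MSTE_AVE", "MSTE_AVE"), ("MSTE", "MSTE_AVE"),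
  ("HPGE_AVE", "HPGE_AVE"), ("HPGE", "HPGE_AVE"),
  ("PSAD_AVE", "PSAD_AVE"), ("PSAD_AVG", "PSAD_AVE"), ("PSAD", "PSAD_AVE"),
  ("COMPREHENSION_INDEX", "COMPREHENSION_INDEX"), ("COMPREHENSION", "COMPREHENSION_INDEX"),
  ("ENGLISH_SUBJECTS", "COMPREHENSION_INDEX"),
  ("GRADUATED_WITH_LATIN", "Graduated_with_Latin"), ("LATIN_HONORS", "Graduated_with_Latin"),
  ("WITH_LATIN_HONORS", "Graduated_with_Latin"),
  ("AGE", "Age"), ("GENDER", "Gender"), ("SEX", "Gender"),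
  ("FATHER_MONTHLY_INCOME", "Father_Monthly_Income"), ("FATHER_INCOME", "Father_Monthly_Income"),
  ("FATHER_EDUCATIONAL_ATTAINMENT", "Father_Educational_Attainment"),
  ("FATHER_EDUCATION", "Father_Educational_Attainment"),
  ("MOTHER_MONTHLY_INCOME", "Mother_Monthly_Income"), ("MOTHER_INCOME", "Mother_Monthly_Income"),
  ("MOTHER_EDUCATIONAL_ATTAINMENT", "Mother_Educational_Attainment"),
  ("MOTHER_EDUCATION", "Mother_Educational_Attainment"),
  ("YEAR_LEVEL", "Year_Level"), ("YEARLEVEL", "Year_Level"), ("YEAR", "Year_Level"),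
  ("EXAM_YEAR", "Exam_year"), ("EXAMYEAR", "Exam_year"),
  ("MONTHS_PREP", "Months_prep"), ("MONTHS_PREPARATION", "Months_prep"),
  ("MONTHS_OF_PREP", "Months_prep")]

-- Source B's _norm: one pass over the stripped string (the append loop is this map),
-- uppercasing alphanumerics in place, '_' for everything else; then strip('_')
def normKey (value : String) : String :=
  let chars := (PySem.Str.strip value).toList.map
    (fun ch => if PySem.Chars.isalnum ch then PySem.Chars.upperChar ch else '_')
  PySem.Str.stripChars (String.ofList chars) "_"

def canonicalize_header_alt (header : String) : String :=
  PySem.Dict.getD CANON (normKey header) (PySem.Str.strip header)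

-- ===== PRECONDITION & SPEC =====
def Spec_canonicalize_header (header : String) (out : String) : Prop := out = canonicalize_header_alt header
instance (header : String) (out : String) : Decidable (Spec_canonicalize_header header out) := by unfold Spec_canonicalize_header; infer_instance

-- ===== CLAIM (what is proved, stated in full; the proofs are below) =====
def Claim_equal_canonicalize_header : Prop := ∀ (header : String), Dom_canonicalize_header header → Spec_canonicalize_header header (canonicalize_header header)

-- ===== LEMMAS AND PROOFS =====

-- B's per-character uppercasing agrees with A's whole-string upper after strip('_')
lemma upperChar_underscore_iff (c : Char) : PySem.Chars.upperChar c = '_' ↔ c = '_' := by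
  unfold PySem.Chars.upperChar PySem.Chars.islower
  split
  · rename_i h
    simp only [Bool.and_eq_true, decide_eq_true_eq] at h
    have h1 : 97 ≤ c.toNat := h.1
    have h2 : c.toNat ≤ 122 := h.2
    constructor
    · intro he
      have hv : (c.toNat - 32).isValidChar := Or.inl (by omega)
      have : (Char.ofNat (c.toNat - 32)).toNat = 95 := by rw [he]; decide
      rw [Char.toNat_ofNat, if_pos hv] at this
      omega
    · intro he; subst he; exact absurd h1 (by decide)
  · simp

lemma stripChars_underscore_map_upperChar (L : List Char) :
    PySem.Chars.stripChars (L.map PySem.Chars.upperChar) ['_']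
      = (PySem.Chars.stripChars L ['_']).map PySem.Chars.upperChar := by
  have hp : ((fun c => (['_'].contains c : Bool)) ∘ PySem.Chars.upperChar)
      = fun c => (['_'].contains c : Bool) := by
    funext c
    simp only [Function.comp_apply, List.contains_cons, List.contains_nil, Bool.or_false]
    by_cases h : c = '_'
    · subst h; decide
    · simp [h, (upperChar_underscore_iff c).not.mpr h]
  unfold PySem.Chars.stripChars
  simp only [← List.map_reverse, List.dropWhile_map, hp]

lemma normKey_eq (s : String) : normKey s = normalize_header s := by
  unfold normKey normalize_header
  simp only [PySem.Str.upper, PySem.Str.stripChars, String.toList_ofList]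
  have hgf : (fun ch => if PySem.Chars.isalnum ch then PySem.Chars.upperChar ch else '_')
      = PySem.Chars.upperChar ∘ (fun ch => if PySem.Chars.isalnum ch then ch else '_') := by
    funext ch
    by_cases h : PySem.Chars.isalnum ch
    · simp [h]
    · simp [h]; decide
  apply congrArg String.ofList
  rw [show ("_" : String).toList = ['_'] by decide, hgf, ← List.map_map,
    stripChars_underscore_map_upperChar]
  rfl

-- all candidate keys of one required column, in A's probe order
def keysOf (required : String) : List String :=
  normalize_header required :: PySem.Dict.getD COLUMN_ALIASES required []

-- A's scan, value part only (none = fall through to header.strip())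
def scanA (n : String) : List String → Option String
  | [] => none
  | required :: rest => if (keysOf required).contains n then some required else scanA n rest

lemma canonLoopA_eq_scanA (header n : String) (rs : List String) :
    canonLoopA header n rs = (scanA n rs).getD (PySem.Str.strip header) := by
  induction rs with
  | nil => rfl
  | cons r rest ih =>
    by_cases h : normalize_header r = n
    · subst h; simp [canonLoopA, scanA, keysOf]
    · have hb : (normalize_header r == n) = false := beq_eq_false_iff_ne.mpr h
      have h2 : ¬ n = normalize_header r := fun e => h e.symm
      by_cases ha : n ∈ PySem.Dict.getD COLUMN_ALIASES r []
      · simp [canonLoopA, scanA, keysOf, hb, h2, ha]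
      · simp [canonLoopA, scanA, keysOf, hb, h2, ha, ih]

-- first-match lookup in a flat pair list
def pairsFind (n : String) : List (String × String) → Option String
  | [] => none
  | (k, v) :: rest => if k == n then some v else pairsFind n rest

-- A's scan flattened into one pair list
def flatPairs (rs : List String) : List (String × String) :=
  rs.flatMap (fun r => (keysOf r).map (fun k => (k, r)))

lemma pairsFind_keys_append (n v : String) (ks : List String) (L : List (String × String)) :
    pairsFind n (ks.map (fun k => (k, v)) ++ L)
      = if ks.contains n then some v else pairsFind n L := by
  induction ks with
  | nil => simp
  | cons k ks ih =>
    by_cases h : k = n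
    · subst h; simp [pairsFind]
    · have hn : ¬ n = k := fun e => h e.symm
      simp [pairsFind, ih, beq_eq_false_iff_ne.mpr h, hn]

lemma scanA_eq_pairsFind_flat (n : String) (rs : List String) :
    scanA n rs = pairsFind n (flatPairs rs) := by
  induction rs with
  | nil => rfl
  | cons r rest ih =>
    simp only [scanA, flatPairs, List.flatMap_cons, pairsFind_keys_append, ih]

-- keep only the first occurrence of each key (seen-keys accumulator)
def dedupAux (seen : List String) : List (String × String) → List (String × String)
  | [] => []
  | (k, v) :: rest =>
    if seen.contains k then dedupAux seen rest
    else (k, v) :: dedupAux (k :: seen) rest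

lemma pairsFind_dedupAux (n : String) (seen : List String) (L : List (String × String))
    (hs : n ∉ seen) : pairsFind n (dedupAux seen L) = pairsFind n L := by
  induction L generalizing seen with
  | nil => rfl
  | cons p rest ih =>
    obtain ⟨k, v⟩ := p
    by_cases hk : k ∈ seen
    · have hkn : (k == n) = false := beq_eq_false_iff_ne.mpr (fun e => hs (e ▸ hk))
      simp [dedupAux, hk, pairsFind, hkn, ih _ hs]
    · by_cases h : k = n
      · subst h; simp [dedupAux, hk, pairsFind]
      · have hs' : n ∉ k :: seen := by
          simp only [List.mem_cons, not_or]
          exact ⟨fun e => h e.symm, hs⟩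
        simp [dedupAux, hk, pairsFind, beq_eq_false_iff_ne.mpr h, ih _ hs']

lemma get?_mk_eq_pairsFind (n : String) (L : List (String × String)) :
    (PySem.Dict.mk L).get? n = pairsFind n L := by
  induction L with
  | nil => simp [PySem.Dict.get?, pairsFind]
  | cons p rest ih =>
    obtain ⟨k, v⟩ := p
    rw [PySem.Dict.get?_mk_cons]
    simp only [pairsFind, ih]

-- the literal table of B is exactly A's flattened scan with later duplicate keys removed
set_option maxRecDepth 100000 in
set_option maxHeartbeats 1000000 in
lemma canon_items : CANON = PySem.Dict.mk (dedupAux [] (flatPairs REQUIRED_COLUMNS)) := by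
  decide

-- ===== VERDICT (by name: the statement is the Claim_ definition above) =====
theorem canonicalize_header_spec : Claim_equal_canonicalize_header := by
  intro header _
  unfold Spec_canonicalize_header canonicalize_header canonicalize_header_alt
  rw [normKey_eq, PySem.Dict.getD_eq_get?_getD, canon_items, get?_mk_eq_pairsFind,
    pairsFind_dedupAux _ [] _ (List.not_mem_nil), ← scanA_eq_pairsFind_flat, canonLoopA_eq_scanA]
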